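-- pv_equiv track=rewrite | github.com/andricilarisa/faculty-stuff | Algoritmi Genetici/SimulatedAnnealing.py | vecini
-- ===== SOURCE A (Python) =====
-- def vecini(vector_biti= []):
--     b = len(vector_biti)
--     matrice = []
--     for i in range(b):
--         aux = []
--         for j in range(b):
--             aux.append(1)
--         matrice.append(aux)
--
--     for i in range(b):
--         for j in range(b):
--             if i == j and vector_biti[j] == 1:
--                 matrice[i][j] = 0
--             else:
--                 if i == j and vector_biti[j] == 0:
--                     matrice[i][j] = 1
--                 else:
--                     matrice[i][j] = vector_biti[j]
--     return matrice
-- ===== SOURCE B (Python) =====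
-- def vecini(vector_biti=[]):
--     # Zipper traversal: walk the vector once keeping the already-seen prefix;
--     # each row is prefix + [flipped head] + remaining suffix. No indices,
--     # no matrix pre-fill, no per-cell diagonal test.
--     pre = []
--     rest = list(vector_biti)
--     rez = []
--     while rest:
--         x = rest.pop(0)
--         fx = 0 if x == 1 else (1 if x == 0 else x)
--         rez.append(pre + [fx] + rest)
--         pre.append(x)
--     return rez
-- ===== Notes on version B (the rewrite author's own statement) =====
-- stated objective: alternative
-- what changed: Replaces A's two index-driven nested-loop passes (all-ones pre-fill, then per-cell i==j overwrite) by an index-free zipper traversal: each row is the already-seen prefix, the flipped current element, and the remaining suffix, concatenated.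
import Mathlib
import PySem

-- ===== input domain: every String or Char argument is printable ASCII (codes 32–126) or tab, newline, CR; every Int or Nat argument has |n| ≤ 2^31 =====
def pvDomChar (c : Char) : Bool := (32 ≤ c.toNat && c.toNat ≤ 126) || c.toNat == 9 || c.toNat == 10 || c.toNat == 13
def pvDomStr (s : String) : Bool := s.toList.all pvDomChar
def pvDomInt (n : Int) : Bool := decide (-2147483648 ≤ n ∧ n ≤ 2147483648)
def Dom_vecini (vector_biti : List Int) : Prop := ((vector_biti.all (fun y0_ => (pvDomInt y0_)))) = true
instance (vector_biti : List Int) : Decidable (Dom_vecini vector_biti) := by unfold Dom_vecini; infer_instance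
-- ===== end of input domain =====

-- B replaces A's two index-driven nested-loop passes (all-ones pre-fill, then per-cell
-- i==j overwrite) by an index-free zipper traversal: each row is the already-seen
-- prefix, the flipped current element, and the remaining suffix. Same value.

-- ===== PORT A =====
def vecini (vector_biti : List Int) : List (List Int) :=
  let b : Int := vector_biti.length
  -- first pass: b×b matrix of ones
  let matrice : List (List Int) :=
    (PySem.List.pyRange 0 b 1).foldl
      (fun matrice _ =>
        matrice ++ [(PySem.List.pyRange 0 b 1).foldl (fun aux _ => aux ++ [(1 : Int)]) []]) []
  -- second pass: overwrite every cell
  (PySem.List.pyRange 0 b 1).foldl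
    (fun matrice i =>
      (PySem.List.pyRange 0 b 1).foldl
        (fun matrice j =>
          let vj := PySem.List.pyGetD vector_biti j 0
          let x : Int :=
            if i = j ∧ vj = 1 then 0
            else if i = j ∧ vj = 0 then 1
            else vj
          matrice.set i.toNat ((PySem.List.pyGetD matrice i []).set j.toNat x))
        matrice)
    matrice

-- ===== PORT B =====
-- fx = 0 if x == 1 else (1 if x == 0 else x)
def pvFlip (x : Int) : Int := if x = 1 then 0 else if x = 0 then 1 else x

-- the while-loop: pop the head, emit pre + [flip x] + rest, push x onto pre
def pvAltLoop (pre : List Int) (rez : List (List Int)) : List Int → List (List Int)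
  | [] => rez
  | x :: rest => pvAltLoop (pre ++ [x]) (rez ++ [pre ++ [pvFlip x] ++ rest]) rest

def vecini_alt (vector_biti : List Int) : List (List Int) :=
  pvAltLoop [] [] vector_biti

-- ===== PRECONDITION & SPEC =====
def Spec_vecini (vector_biti : List Int) (out : List (List Int)) : Prop := out = vecini_alt vector_biti
instance (vector_biti : List Int) (out : List (List Int)) : Decidable (Spec_vecini vector_biti out) := by unfold Spec_vecini; infer_instance

-- ===== CLAIM (what is proved, stated in full; the proofs are below) =====
def Claim_equal_vecini : Prop := ∀ (vector_biti : List Int), Dom_vecini vector_biti → Spec_vecini vector_biti (vecini vector_biti)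

-- ===== LEMMAS AND PROOFS =====

-- the cell value A writes at (i, j)
def pvCell (v : List Int) (i j : Nat) : Int :=
  if i = j ∧ v.getD j 0 = 1 then 0
  else if i = j ∧ v.getD j 0 = 0 then 1
  else v.getD j 0

-- the row A ends up with at index i
def pvRow (v : List Int) (i : Nat) : List Int :=
  (List.range v.length).map (pvCell v i)

-- a foldl that appends [1] n times builds replicate n 1
theorem pv_ones (n : Nat) (acc : List Int) :
    (List.range n).foldl (fun aux _ => aux ++ [(1 : Int)]) acc = acc ++ List.replicate n 1 := by
  induction n generalizing acc with
  | zero => simp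
  | succ k ih =>
      rw [List.range_succ, List.foldl_append]
      simp [ih, List.replicate_succ' (n := k)]

-- a foldl that appends one element per index builds the map
theorem pv_append_map {α β : Type} (l : List α) (h : α → β) (acc : List β) :
    l.foldl (fun rez i => rez ++ [h i]) acc = acc ++ l.map h := by
  induction l generalizing acc with
  | nil => simp
  | cons a t ih => simp [ih]

-- writing f j at every position j of a long-enough list yields the map plus the tail
theorem pv_setloop {α : Type} (f : Nat → α) (k : Nat) (r : List α) (hk : k ≤ r.length) :
    (List.range k).foldl (fun r j => r.set j (f j)) r
      = (List.range k).map f ++ r.drop k := by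
  induction k with
  | zero => simp
  | succ m ih =>
      rw [List.range_succ, List.foldl_append, ih (by omega)]
      have hm : m < r.length := by omega
      have hd : r.drop m = r[m] :: r.drop (m + 1) := by
        rw [List.drop_eq_getElem_cons hm]
      rw [hd]
      simp only [List.foldl_cons, List.foldl_nil, List.map_append, List.map_cons,
        List.map_nil, List.set_append]
      simp
      rw [hd, List.set_cons_zero]

-- the inner j-loop of A: repeated writes into row i collapse to one row replacement
theorem pv_inner_aux {α : Type} (f : Nat → α) (i : Nat) (m : List (List α))
    (hi : i < m.length) (k : Nat) :
    (List.range k).foldl (fun m j => m.set i ((m.getD i []).set j (f j))) m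
      = m.set i ((List.range k).foldl (fun r j => r.set j (f j)) (m.getD i [])) := by
  induction k with
  | zero =>
      rw [List.range_zero, List.foldl_nil, List.foldl_nil,
        List.getD_eq_getElem _ _ hi, List.set_getElem_self]
  | succ t ih =>
      rw [List.range_succ, List.foldl_append, ih, List.foldl_append,
        List.foldl_cons, List.foldl_nil, List.foldl_cons, List.foldl_nil]
      unfold List.getD
      rw [List.getElem?_set_self (by simpa using hi), List.set_set]
      rfl

theorem pv_inner {α : Type} (f : Nat → α) (n i : Nat) (m : List (List α))
    (hi : i < m.length) (hrow : (m.getD i []).length = n) :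
    (List.range n).foldl (fun m j => m.set i ((m.getD i []).set j (f j))) m
      = m.set i ((List.range n).map f) := by
  rw [pv_inner_aux f i m hi, pv_setloop f n _ (le_of_eq hrow.symm),
    List.drop_eq_nil_of_le (le_of_eq hrow), List.append_nil]

-- the outer i-loop of A, with the invariant "first k rows rewritten, rest still all ones"
theorem pv_outer (v : List Int) (k : Nat) (hk : k ≤ v.length) :
    (List.range k).foldl
      (fun m i => (List.range v.length).foldl
        (fun m j => m.set i ((m.getD i []).set j (pvCell v i j))) m)
      (List.replicate v.length (List.replicate v.length (1 : Int)))
      = (List.range k).map (pvRow v)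
        ++ List.replicate (v.length - k) (List.replicate v.length 1) := by
  induction k with
  | zero => simp
  | succ t ih =>
      rw [List.range_succ, List.foldl_append, ih (by omega)]
      have hlen : ((List.range t).map (pvRow v)
          ++ List.replicate (v.length - t) (List.replicate v.length (1 : Int))).length
          = v.length := by simp; omega
      have ht : t < v.length := by omega
      have hrow : (((List.range t).map (pvRow v)
          ++ List.replicate (v.length - t) (List.replicate v.length (1 : Int))).getD t []).length
          = v.length := by
        rw [List.getD_append_right _ _ _ _ (by simp), List.getD_eq_getElem]
        · simp
        · simp; omega
      rw [List.foldl_cons, List.foldl_nil,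
        pv_inner (pvCell v t) v.length t _ (by omega) hrow]
      rw [List.set_append]
      have : ¬ t < ((List.range t).map (pvRow v)).length := by simp
      rw [if_neg this]
      have hrep : (List.replicate (v.length - t) (List.replicate v.length (1 : Int))).set
          (t - ((List.range t).map (pvRow v)).length) ((List.range v.length).map (pvCell v t))
          = pvRow v t :: List.replicate (v.length - (t + 1)) (List.replicate v.length 1) := by
        have : v.length - t = (v.length - (t + 1)) + 1 := by omega
        rw [this, List.replicate_succ]
        simp [pvRow]
      rw [hrep, List.map_append]
      simp

theorem pv_vecini_eq_map (v : List Int) :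
    vecini v = (List.range v.length).map (pvRow v) := by
  unfold vecini
  simp only [PySem.List.pyRange_zero_natCast, List.foldl_map,
    PySem.List.pyGetD_natCast, Int.toNat_natCast, Nat.cast_inj]
  rw [pv_append_map, pv_ones]
  simp only [List.nil_append, List.map_const', List.length_range]
  have := pv_outer v v.length le_rfl
  simp only [pvCell] at this
  rw [this]
  simp

-- a list is the map of its getD over its index range
theorem pv_getD_range (l : List Int) :
    (List.range l.length).map (fun j => l.getD j 0) = l := by
  apply List.ext_getElem
  · simp
  · intro j h1 h2
    simp [List.getD, List.getElem?_eq_getElem (by simpa using h2)]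

-- row 0 of A's matrix for x::rest is the head-flipped vector
theorem pv_row_zero (x : Int) (rest : List Int) :
    pvRow (x :: rest) 0 = pvFlip x :: rest := by
  unfold pvRow
  rw [show (x :: rest).length = rest.length + 1 from rfl,
    List.range_succ_eq_map, List.map_cons, List.map_map]
  have h0 : pvCell (x :: rest) 0 0 = pvFlip x := by
    simp [pvCell, pvFlip]
  have h1 : ((List.range rest.length).map (pvCell (x :: rest) 0 ∘ Nat.succ)) = rest := by
    have : ∀ j, (pvCell (x :: rest) 0 ∘ Nat.succ) j = rest.getD j 0 := by
      intro j; simp [pvCell, Function.comp]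
    rw [List.map_congr_left (fun j _ => this j), pv_getD_range]
  rw [h0, h1]

-- later rows of A's matrix for x::rest keep the head and recurse on rest
theorem pv_row_succ (x : Int) (rest : List Int) (i : Nat) :
    pvRow (x :: rest) (i + 1) = x :: pvRow rest i := by
  unfold pvRow
  rw [show (x :: rest).length = rest.length + 1 from rfl,
    List.range_succ_eq_map, List.map_cons, List.map_map]
  have h0 : pvCell (x :: rest) (i + 1) 0 = x := by
    simp [pvCell]
  have h1 : ∀ j, (pvCell (x :: rest) (i + 1) ∘ Nat.succ) j = pvCell rest i j := by
    intro j; simp [pvCell, Function.comp]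
  rw [h0, List.map_congr_left (fun j _ => h1 j)]

-- the zipper loop, characterised: every emitted row is pre ++ (w with bit i flipped)
theorem pv_altLoop_eq (w : List Int) : ∀ (pre : List Int) (rez : List (List Int)),
    pvAltLoop pre rez w = rez ++ (List.range w.length).map (fun i => pre ++ pvRow w i) := by
  induction w with
  | nil => intro pre rez; simp [pvAltLoop]
  | cons x rest ih =>
      intro pre rez
      rw [pvAltLoop, ih,
        show (x :: rest).length = rest.length + 1 from rfl,
        List.range_succ_eq_map, List.map_cons, List.map_map, pv_row_zero,
        List.append_assoc]
      simp only [List.cons_append, List.nil_append, List.cons.injEq,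
        List.append_cancel_left_eq]
      exact ⟨by simp, List.map_congr_left (fun i _ => by simp [pv_row_succ])⟩

-- B equals the row-map characterisation of A's matrix
theorem pv_alt_eq_map (v : List Int) :
    vecini_alt v = (List.range v.length).map (pvRow v) := by
  rw [vecini_alt, pv_altLoop_eq]
  simp

-- ===== VERDICT (by name: the statement is the Claim_ definition above) =====
theorem vecini_spec : Claim_equal_vecini := by
  intro v _
  unfold Spec_vecini
  rw [pv_vecini_eq_map, pv_alt_eq_map]
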